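-- pv_equiv track=rewrite | github.com/Obsidian-Owl/floe | testing/tests/unit/test_dbt_profile_backup.py | _remove_nested_defs
-- ===== SOURCE A (Python) =====
-- def _remove_nested_defs(region: str) -> str:
--     """Remove nested function definitions from a code region.
--
--     Uses line-by-line analysis: when a ``def`` line is found, all
--     subsequent lines that are more indented (or blank) are removed
--     until a line at the same or lesser indentation is reached.
--
--     Args:
--         region: Source text that may contain nested function definitions.
--
--     Returns:
--         Source text with nested def bodies removed.
--     """
--     lines = region.split("\n")
--     result: list[str] = []
--     skip_indent: int | None = None
--
--     for line in lines:
--         stripped = line.lstrip()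
--
--         if skip_indent is not None:
--             # We are inside a nested def -- skip until de-indentation
--             if stripped == "":
--                 continue  # Blank line inside nested def
--             current_indent = len(line) - len(stripped)
--             if current_indent > skip_indent:
--                 continue  # Still inside the nested def
--             # De-indented: stop skipping
--             skip_indent = None
--
--         if stripped.startswith("def "):
--             # Start of a nested function definition
--             skip_indent = len(line) - len(stripped)
--             continue
--
--         result.append(line)
--
--     return "\n".join(result)
-- ===== SOURCE B (Python) =====
-- def _remove_nested_defs(region: str) -> str:
--     """Declarative re-implementation: keep line i iff it is not a def line and
--     no earlier def's block covers it, where the block of a def at k (indent d)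
--     covers i when every line in (k, i] is blank or indented deeper than d."""
--     lines = region.split("\n")
--     n = len(lines)
--
--     def covered(i):
--         for k in range(i):
--             sk = lines[k].lstrip()
--             if sk.startswith("def "):
--                 d = len(lines[k]) - len(sk)
--                 if all(lines[m].lstrip() == ""
--                        or len(lines[m]) - len(lines[m].lstrip()) > d
--                        for m in range(k + 1, i + 1)):
--                     return True
--         return False
--
--     kept = [lines[i] for i in range(n)
--             if not lines[i].lstrip().startswith("def ") and not covered(i)]
--     return "\n".join(kept)
-- ===== Notes on version B (the rewrite author's own statement) =====
-- stated objective: alternative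
-- what changed: Replaces A's stateful streaming pass (a skip_indent variable carried across one loop) with a stateless declarative formulation: each line is kept iff it is not a def line and no earlier def's blank-or-deeper block extends through it, computed by an independent per-line covered() check.
import Mathlib
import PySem

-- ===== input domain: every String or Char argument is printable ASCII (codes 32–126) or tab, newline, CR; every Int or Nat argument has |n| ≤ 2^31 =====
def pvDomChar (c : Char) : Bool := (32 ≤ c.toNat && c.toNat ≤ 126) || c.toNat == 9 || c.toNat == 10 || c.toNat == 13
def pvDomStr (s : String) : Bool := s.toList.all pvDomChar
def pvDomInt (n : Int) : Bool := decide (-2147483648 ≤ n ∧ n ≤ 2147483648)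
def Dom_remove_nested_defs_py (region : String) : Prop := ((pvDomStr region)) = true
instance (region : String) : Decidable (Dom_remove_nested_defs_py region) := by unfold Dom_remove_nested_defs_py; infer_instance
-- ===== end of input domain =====

-- B replaces A's stateful streaming pass (skip_indent carried across the loop) by a
-- declarative per-line keep predicate: line i is kept iff it is not a def line and no
-- earlier def's block covers it (objective: alternative; quadratic but stateless).
-- Return-value equivalence only; neither program mutates its argument.

-- ===== PORT A =====
-- A's single pass over the lines, carrying skip_indent : Option Int ('continue' = tail call
-- with the same state; falling through the de-indent check = the skip = none branch body).
def pvGoA : Option Int → List (List Char) → List (List Char)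
  | some d, line :: rest =>
    let stripped := PySem.Chars.lstrip line
    if stripped = [] then pvGoA (some d) rest
    else if d < (line.length : Int) - stripped.length then pvGoA (some d) rest
    else if PySem.Chars.startswith stripped ("def ".toList) then
      pvGoA (some ((line.length : Int) - stripped.length)) rest
    else line :: pvGoA none rest
  | none, line :: rest =>
    let stripped := PySem.Chars.lstrip line
    if PySem.Chars.startswith stripped ("def ".toList) then
      pvGoA (some ((line.length : Int) - stripped.length)) rest
    else line :: pvGoA none rest
  | _, [] => []

def remove_nested_defs_py (region : String) : String :=
  String.ofList (PySem.Chars.join ['\n']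
    (pvGoA none (PySem.Chars.splitOn region.toList ['\n'])))

-- ===== PORT B =====
-- Source B's helpers: blank test, indent, def test (all via lstrip, as in the Python).
def pvBlank (l : List Char) : Bool := PySem.Chars.lstrip l == []
def pvInd (l : List Char) : Int := (l.length : Int) - (PySem.Chars.lstrip l).length
def pvIsDef (l : List Char) : Bool := PySem.Chars.startswith (PySem.Chars.lstrip l) ("def ".toList)

-- Source B's covered(i): some k < i is a def line whose block (blank or deeper lines) runs through i.
def pvCovered (lines : List (List Char)) (i : Nat) : Bool :=
  (List.range i).any fun k =>
    pvIsDef (lines.getD k []) &&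
      ((List.range' (k + 1) (i - k)).all fun m =>
        pvBlank (lines.getD m []) || decide (pvInd (lines.getD k []) < pvInd (lines.getD m [])))

-- Source B's kept list comprehension over range(n).
def pvGoB (lines : List (List Char)) : List (List Char) :=
  ((List.range lines.length).filter fun i =>
    !pvIsDef (lines.getD i []) && !pvCovered lines i).map (fun i => lines.getD i [])

def remove_nested_defs_py_alt (region : String) : String :=
  String.ofList (PySem.Chars.join ['\n']
    (pvGoB (PySem.Chars.splitOn region.toList ['\n'])))

-- ===== PRECONDITION & SPEC =====
def Spec_remove_nested_defs_py (region : String) (out : String) : Prop := out = remove_nested_defs_py_alt region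
instance (region : String) (out : String) : Decidable (Spec_remove_nested_defs_py region out) := by unfold Spec_remove_nested_defs_py; infer_instance

-- ===== CLAIM (what is proved, stated in full; the proofs are below) =====
def Claim_equal_remove_nested_defs_py : Prop := ∀ (region : String), Dom_remove_nested_defs_py region → Spec_remove_nested_defs_py region (remove_nested_defs_py region)

-- ===== LEMMAS AND PROOFS =====

-- Step forms of A's loop, phrased with B's helper predicates.
theorem pvGoA_none_cons (l : List Char) (rest : List (List Char)) :
    pvGoA none (l :: rest) =
      if pvIsDef l then pvGoA (some (pvInd l)) rest else l :: pvGoA none rest := by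
  simp only [pvGoA, pvIsDef, pvInd]

theorem pvGoA_some_cons (d : Int) (l : List Char) (rest : List (List Char)) :
    pvGoA (some d) (l :: rest) =
      if pvBlank l then pvGoA (some d) rest
      else if d < pvInd l then pvGoA (some d) rest
      else if pvIsDef l then pvGoA (some (pvInd l)) rest
      else l :: pvGoA none rest := by
  simp only [pvGoA, pvBlank, pvInd, pvIsDef, beq_iff_eq]

-- The def at k is "open at position p": every line strictly between k and p is blank or deeper.
def pvOpen (lines : List (List Char)) (k p : Nat) : Prop :=
  k < p ∧ pvIsDef (lines.getD k []) = true ∧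
    ∀ m, k < m → m < p → pvBlank (lines.getD m []) = true ∨ pvInd (lines.getD k []) < pvInd (lines.getD m [])

-- A's state invariant at position p: none ↔ no open def; some d ↔ d is the indent of an
-- open def and a lower bound of all open defs' indents.
def pvInvNone (lines : List (List Char)) (p : Nat) : Prop := ∀ k, ¬ pvOpen lines k p
def pvInvSome (lines : List (List Char)) (p : Nat) (d : Int) : Prop :=
  (∃ k, pvOpen lines k p ∧ pvInd (lines.getD k []) = d) ∧
  (∀ k, pvOpen lines k p → d ≤ pvInd (lines.getD k []))

-- Source B's kept lines from position p on.
def pvKeptFrom (lines : List (List Char)) (p : Nat) : List (List Char) :=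
  ((List.range' p (lines.length - p)).filter fun i =>
    !pvIsDef (lines.getD i []) && !pvCovered lines i).map (fun i => lines.getD i [])

theorem pvCovered_iff (lines : List (List Char)) (i : Nat) :
    pvCovered lines i = true ↔ ∃ k, k < i ∧ pvOpen lines k (i + 1) := by
  unfold pvCovered pvOpen
  simp only [List.any_eq_true, List.mem_range, Bool.and_eq_true, List.all_eq_true,
    List.mem_range'_1, and_imp, Bool.or_eq_true, decide_eq_true_eq]
  constructor
  · rintro ⟨k, hk, hdef, hall⟩
    exact ⟨k, hk, Nat.lt_succ_of_lt hk, hdef, fun m h1 h2 => hall m h1 (by omega)⟩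
  · rintro ⟨k, hk, _, hdef, hall⟩
    exact ⟨k, hk, hdef, fun m h1 h2 => hall m h1 (by omega)⟩

theorem pvKeptFrom_end (lines : List (List Char)) : pvKeptFrom lines lines.length = [] := by
  simp [pvKeptFrom]

theorem pvKeptFrom_step (lines : List (List Char)) (p : Nat) (hp : p < lines.length) :
    pvKeptFrom lines p =
      (if !pvIsDef (lines.getD p []) && !pvCovered lines p
       then [lines.getD p []] else []) ++ pvKeptFrom lines (p + 1) := by
  unfold pvKeptFrom
  rw [show lines.length - p = (lines.length - (p + 1)) + 1 by omega]
  rw [List.range'_succ, List.filter_cons]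
  split <;> simp [*]

-- The two shapes pvKeptFrom_step takes once the condition's value is known.
theorem pvKeptFrom_drop (lines : List (List Char)) (p : Nat) (hp : p < lines.length)
    (hc : (!pvIsDef (lines.getD p []) && !pvCovered lines p) = false) :
    pvKeptFrom lines p = pvKeptFrom lines (p + 1) := by
  rw [pvKeptFrom_step lines p hp, hc, if_neg Bool.false_ne_true, List.nil_append]

theorem pvKeptFrom_keep (lines : List (List Char)) (p : Nat) (hp : p < lines.length)
    (hc : (!pvIsDef (lines.getD p []) && !pvCovered lines p) = true) :
    pvKeptFrom lines p = lines.getD p [] :: pvKeptFrom lines (p + 1) := by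
  rw [pvKeptFrom_step lines p hp, hc, if_pos rfl, List.singleton_append]

-- Core invariant induction: A's pass from position p computes B's kept-lines suffix,
-- provided the state matches the open-def situation at p.
theorem pvMain (lines : List (List Char)) :
    ∀ rem p, p + rem = lines.length →
      (pvInvNone lines p → pvGoA none (lines.drop p) = pvKeptFrom lines p) ∧
      (∀ d, pvInvSome lines p d → pvGoA (some d) (lines.drop p) = pvKeptFrom lines p) := by
  intro rem
  induction rem with
  | zero =>
    intro p hp
    have h : lines.drop p = [] := by rw [List.drop_eq_nil_iff]; omega
    have h2 : pvKeptFrom lines p = [] := by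
      have he : p = lines.length := by omega
      rw [he, pvKeptFrom_end]
    exact ⟨fun _ => by rw [h, h2]; rfl, fun d _ => by rw [h, h2]; rfl⟩
  | succ n ih =>
    intro p hp
    have hplt : p < lines.length := by omega
    have hdrop : lines.drop p = lines.getD p [] :: lines.drop (p + 1) := by
      rw [List.drop_eq_getElem_cons hplt, List.getD_eq_getElem?_getD,
        List.getElem?_eq_getElem hplt]
      rfl
    have ihn := ih (p + 1) (by omega)
    constructor
    · -- state none: no open def at p
      intro hnone
      have hnc : pvCovered lines p = false := by
        rw [Bool.eq_false_iff, Ne, pvCovered_iff]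
        rintro ⟨k, hk, hopen⟩
        exact hnone k ⟨hk, hopen.2.1, fun m h1 h2 => hopen.2.2 m h1 (by omega)⟩
      rw [hdrop, pvGoA_none_cons]
      by_cases hdf : pvIsDef (lines.getD p []) = true
      · rw [if_pos hdf, pvKeptFrom_drop lines p hplt (by rw [hdf]; rfl)]
        refine ihn.2 (pvInd (lines.getD p [])) ⟨⟨p, ⟨Nat.lt_succ_self p, hdf, fun m h1 h2 => by omega⟩, rfl⟩, ?_⟩
        rintro k ⟨hkp1, hkdef, hall⟩
        rcases Nat.lt_or_ge k p with hkp | hkp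
        · exact absurd ⟨hkp, hkdef, fun m h1 h2 => hall m h1 (by omega)⟩ (hnone k)
        · have he : k = p := by omega
          rw [he]
      · have hdf' : pvIsDef (lines.getD p []) = false := Bool.eq_false_iff.mpr hdf
        rw [if_neg hdf, pvKeptFrom_keep lines p hplt (by rw [hdf', hnc]; rfl)]
        refine congrArg _ (ihn.1 ?_)
        rintro k ⟨hkp1, hkdef, hall⟩
        rcases Nat.lt_or_ge k p with hkp | hkp
        · exact absurd ⟨hkp, hkdef, fun m h1 h2 => hall m h1 (by omega)⟩ (hnone k)
        · have he : k = p := by omega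
          rw [he] at hkdef; exact hdf hkdef
    · -- state some d
      rintro d ⟨⟨kw, hkw, hkwd⟩, hmin⟩
      have hkwp : kw < p := hkw.1
      rw [hdrop, pvGoA_some_cons]
      by_cases hb : pvBlank (lines.getD p []) = true
      · -- blank line: covered by kw, keep skipping
        have hbe : PySem.Chars.lstrip (lines.getD p []) = [] := by
          simpa [pvBlank] using hb
        have hdf : pvIsDef (lines.getD p []) = false := by
          unfold pvIsDef; rw [hbe]; rfl
        have hcov : pvCovered lines p = true := by
          rw [pvCovered_iff]
          refine ⟨kw, hkwp, by omega, hkw.2.1, fun m h1 h2 => ?_⟩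
          rcases Nat.lt_or_ge m p with hmp | hmp
          · exact hkw.2.2 m h1 hmp
          · have he : m = p := by omega
            rw [he]; exact Or.inl hb
        rw [if_pos hb, pvKeptFrom_drop lines p hplt (by rw [hcov]; simp)]
        refine ihn.2 d ⟨⟨kw, ⟨by omega, hkw.2.1, fun m h1 h2 => ?_⟩, hkwd⟩, ?_⟩
        · rcases Nat.lt_or_ge m p with hmp | hmp
          · exact hkw.2.2 m h1 hmp
          · have he : m = p := by omega
            rw [he]; exact Or.inl hb
        · rintro k ⟨hkp1, hkdef, hall⟩
          have hkp : k < p := by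
            rcases Nat.lt_or_ge k p with h | h
            · exact h
            · exfalso
              have he : k = p := by omega
              rw [he, hdf] at hkdef; exact Bool.false_ne_true hkdef
          exact hmin k ⟨hkp, hkdef, fun m h1 h2 => hall m h1 (by omega)⟩
      · have hb' : pvBlank (lines.getD p []) = false := Bool.eq_false_iff.mpr hb
        rw [if_neg hb]
        by_cases hdeep : d < pvInd (lines.getD p [])
        · -- still deeper than d: covered by kw, keep skipping
          have hcov : pvCovered lines p = true := by
            rw [pvCovered_iff]
            refine ⟨kw, hkwp, by omega, hkw.2.1, fun m h1 h2 => ?_⟩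
            rcases Nat.lt_or_ge m p with hmp | hmp
            · exact hkw.2.2 m h1 hmp
            · have he : m = p := by omega
              rw [he]; exact Or.inr (by rw [hkwd]; exact hdeep)
          rw [if_pos hdeep, pvKeptFrom_drop lines p hplt (by rw [hcov]; simp)]
          refine ihn.2 d ⟨⟨kw, ⟨by omega, hkw.2.1, fun m h1 h2 => ?_⟩, hkwd⟩, ?_⟩
          · rcases Nat.lt_or_ge m p with hmp | hmp
            · exact hkw.2.2 m h1 hmp
            · have he : m = p := by omega
              rw [he]; exact Or.inr (by rw [hkwd]; exact hdeep)
          · rintro k ⟨hkp1, hkdef, hall⟩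
            rcases Nat.lt_or_ge k p with hkp | hkp
            · exact hmin k ⟨hkp, hkdef, fun m h1 h2 => hall m h1 (by omega)⟩
            · have he : k = p := by omega
              rw [he]; omega
        · -- de-indented boundary: nothing before p remains open past p
          rw [if_neg hdeep]
          have hnopen' : ∀ k, k < p → ¬ pvOpen lines k (p + 1) := by
            rintro k hkp ⟨_, hkdef, hall⟩
            have hop : pvOpen lines k p := ⟨hkp, hkdef, fun m h1 h2 => hall m h1 (by omega)⟩
            have hdk := hmin k hop
            rcases hall p hkp (Nat.lt_succ_self p) with hbl | hdp
            · rw [hbl] at hb'; exact Bool.noConfusion hb'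
            · omega
          have hnc : pvCovered lines p = false := by
            rw [Bool.eq_false_iff, Ne, pvCovered_iff]
            rintro ⟨k, hk, hopen⟩
            exact hnopen' k hk hopen
          by_cases hdf : pvIsDef (lines.getD p []) = true
          · rw [if_pos hdf, pvKeptFrom_drop lines p hplt (by rw [hdf]; rfl)]
            refine ihn.2 (pvInd (lines.getD p []))
              ⟨⟨p, ⟨Nat.lt_succ_self p, hdf, fun m h1 h2 => by omega⟩, rfl⟩, ?_⟩
            rintro k ⟨hkp1, hkdef, hall⟩
            rcases Nat.lt_or_ge k p with hkp | hkp
            · exact absurd ⟨by omega, hkdef, hall⟩ (hnopen' k hkp)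
            · have he : k = p := by omega
              rw [he]
          · have hdf' : pvIsDef (lines.getD p []) = false := Bool.eq_false_iff.mpr hdf
            rw [if_neg hdf, pvKeptFrom_keep lines p hplt (by rw [hdf', hnc]; rfl)]
            refine congrArg _ (ihn.1 ?_)
            rintro k ⟨hkp1, hkdef, hall⟩
            rcases Nat.lt_or_ge k p with hkp | hkp
            · exact hnopen' k hkp ⟨by omega, hkdef, hall⟩
            · have he : k = p := by omega
              rw [he] at hkdef; exact hdf hkdef

theorem pvGoB_eq (lines : List (List Char)) : pvGoB lines = pvKeptFrom lines 0 := by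
  unfold pvGoB pvKeptFrom
  rw [List.range_eq_range']
  simp

theorem pvGoA_eq_pvGoB (lines : List (List Char)) : pvGoA none lines = pvGoB lines := by
  rw [pvGoB_eq]
  have h := (pvMain lines lines.length 0 (by omega)).1 (by rintro k ⟨hk, _⟩; omega)
  simpa using h

-- ===== VERDICT (by name: the statement is the Claim_ definition above) =====
theorem remove_nested_defs_py_spec : Claim_equal_remove_nested_defs_py := by
  intro region _
  unfold Spec_remove_nested_defs_py remove_nested_defs_py remove_nested_defs_py_alt
  rw [pvGoA_eq_pvGoB]
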